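-- pv_equiv track=rewrite | github.com/uw-bionlp/covid-parser | covid/utils/seq_prep.py | add_BIO_seq
-- ===== SOURCE A (Python) =====
-- def add_BIO_seq(seq, begin, inside, outside):
--
--     # Shift sequence to assess previous label
--     seq_previous = [outside] + seq[0:-1]
--
--     # Get new labels
--     new_seq = []
--     for label_previous, label_current in zip(seq_previous, seq):
--
--         # Current label is negative
--         if label_current == outside:
--             new_seq.append(label_current)
--
--         # Previous label not equal to current label, so add begin prefix
--         elif label_current != label_previous:
--             new_seq.append(begin + label_current)
--
--         # Previous label and current label equal
--         elif label_current == label_previous: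
--             new_seq.append(inside + label_current)
--
--         # Check for error
--         else:
--             raise ValueError("Error assigning BIO labels")
--
--     return new_seq
-- ===== SOURCE B (Python) =====
-- def add_BIO_seq(seq, begin, inside, outside):
--     # Run-based pass: split seq into maximal runs of equal labels,
--     # emit outside for an outside-run, else begin+label once then inside+label.
--     new_seq = []
--     i = 0
--     n = len(seq)
--     while i < n:
--         label = seq[i]
--         j = i + 1
--         while j < n and seq[j] == label:
--             j += 1
--         if label == outside:
--             new_seq.extend([outside] * (j - i))
--         else:
--             new_seq.append(begin + label)
--             new_seq.extend([inside + label] * (j - i - 1))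
--         i = j
--     return new_seq
-- ===== Notes on version B (the rewrite author's own statement) =====
-- stated objective: alternative
-- what changed: Replaces A's pairwise lookback over a shifted copy of the list with a single run-based pass over maximal runs of equal labels: each run emits outside*len, or begin+label followed by inside+label for the rest.
import Mathlib
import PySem

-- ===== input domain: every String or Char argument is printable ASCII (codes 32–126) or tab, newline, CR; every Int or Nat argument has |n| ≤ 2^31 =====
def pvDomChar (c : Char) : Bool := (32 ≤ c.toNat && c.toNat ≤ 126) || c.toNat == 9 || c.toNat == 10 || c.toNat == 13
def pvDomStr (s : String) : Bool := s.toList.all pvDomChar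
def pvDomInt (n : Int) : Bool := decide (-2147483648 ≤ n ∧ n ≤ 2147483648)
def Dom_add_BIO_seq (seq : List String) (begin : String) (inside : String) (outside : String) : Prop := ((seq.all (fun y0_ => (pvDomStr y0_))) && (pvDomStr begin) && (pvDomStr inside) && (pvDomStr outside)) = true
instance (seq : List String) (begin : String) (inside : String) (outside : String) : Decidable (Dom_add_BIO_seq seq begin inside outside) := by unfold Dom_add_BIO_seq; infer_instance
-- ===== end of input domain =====

-- B replaces A's pairwise-lookback over a shifted copy with a run-based pass over maximal runs of equal labels (alternative decomposition, same cost).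


-- ===== PORT A =====
def add_BIO_seq (seq : List String) (begin : String) (inside : String) (outside : String) : List String :=
  -- seq_previous = [outside] + seq[0:-1]
  let seq_previous := outside :: PySem.List.slice seq (some 0) (some (-1))
  -- for label_previous, label_current in zip(seq_previous, seq): …
  (List.zip seq_previous seq).foldl
    (fun new_seq pc =>
      let label_previous := pc.1
      let label_current := pc.2
      if label_current == outside then new_seq ++ [label_current]
      else if label_current != label_previous then new_seq ++ [begin ++ label_current]
      else if label_current == label_previous then new_seq ++ [inside ++ label_current]
      else new_seq)  -- the final 'raise' branch is unreachable
    []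

-- ===== PORT B =====
-- run-based pass: take the maximal run of labels equal to the head, emit its output, recurse on the rest
def add_BIO_seq_altGo (begin inside outside : String) : List String → List String
  | [] => []
  | x :: rest =>
    let same := rest.takeWhile (fun y => y == x)
    let rest' := rest.dropWhile (fun y => y == x)
    let out := if x == outside then List.replicate (same.length + 1) outside
               else (begin ++ x) :: List.replicate same.length (inside ++ x)
    out ++ add_BIO_seq_altGo begin inside outside rest'
termination_by l => l.length
decreasing_by
  simp only [List.length_cons]
  exact Nat.lt_succ_of_le (List.length_dropWhile_le _ _)

def add_BIO_seq_alt (seq : List String) (begin : String) (inside : String) (outside : String) : List String :=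
  add_BIO_seq_altGo begin inside outside seq

-- ===== PRECONDITION & SPEC =====
def Spec_add_BIO_seq (seq : List String) (begin : String) (inside : String) (outside : String) (out : List String) : Prop := out = add_BIO_seq_alt seq begin inside outside
instance (seq : List String) (begin : String) (inside : String) (outside : String) (out : List String) : Decidable (Spec_add_BIO_seq seq begin inside outside out) := by unfold Spec_add_BIO_seq; infer_instance

-- ===== CLAIM (what is proved, stated in full; the proofs are below) =====
def Claim_equal_add_BIO_seq : Prop := ∀ (seq : List String) (begin : String) (inside : String) (outside : String), Dom_add_BIO_seq seq begin inside outside → Spec_add_BIO_seq seq begin inside outside (add_BIO_seq seq begin inside outside)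

-- ===== LEMMAS AND PROOFS =====

-- the per-element decision A makes, as a function of (previous, current)
def pvBIOStep (begin inside outside : String) (p c : String) : String :=
  if c == outside then c
  else if c != p then begin ++ c
  else inside ++ c

-- A's loop as structural recursion threading the previous label
def pvBIOSpec (begin inside outside : String) : String → List String → List String
  | _, [] => []
  | prev, c :: rest => pvBIOStep begin inside outside prev c :: pvBIOSpec begin inside outside c rest

theorem pvFoldlAppend {α β : Type} (g : β → α) (l : List β) (init : List α) :
    l.foldl (fun acc b => acc ++ [g b]) init = init ++ l.map g := by
  induction l generalizing init with
  | nil => simp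
  | cons x xs ih => simp [List.foldl, ih]

theorem pvZipMapSpec (begin inside outside prev : String) (l : List String) :
    (List.zip (prev :: l.dropLast) l).map (fun pc => pvBIOStep begin inside outside pc.1 pc.2)
      = pvBIOSpec begin inside outside prev l := by
  induction l generalizing prev with
  | nil => simp [pvBIOSpec]
  | cons c rest ih =>
    cases rest with
    | nil => simp [pvBIOSpec]
    | cons d rs =>
      have hd : (c :: d :: rs).dropLast = c :: (d :: rs).dropLast := by
        simp [List.dropLast_cons_of_ne_nil]
      rw [hd, List.zip_cons_cons, List.map_cons, pvBIOSpec, ih c]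

theorem pvSpecReplicate (begin inside outside x : String) (k : Nat) (d : List String) :
    pvBIOSpec begin inside outside x (List.replicate k x ++ d)
      = List.replicate k (pvBIOStep begin inside outside x x) ++ pvBIOSpec begin inside outside x d := by
  induction k with
  | zero => simp
  | succ n ih => simp [List.replicate_succ, pvBIOSpec, ih]

theorem pvTakeWhileEqReplicate (x : String) (l : List String) :
    l.takeWhile (fun y => y == x) = List.replicate (l.takeWhile (fun y => y == x)).length x := by
  induction l with
  | nil => simp
  | cons y ys ih =>
    by_cases h : y = x
    · subst h
      simp only [List.takeWhile_cons, beq_self_eq_true]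
      simp [List.replicate_succ, ← ih]
    · simp [h]

theorem pvAltGoSpec (begin inside outside : String) (l : List String) (prev : String)
    (h : ∀ x t, l = x :: t → x = outside ∨ x ≠ prev) :
    add_BIO_seq_altGo begin inside outside l = pvBIOSpec begin inside outside prev l := by
  induction hn : l.length using Nat.strong_induction_on generalizing l prev with
  | _ n ih =>
  cases l with
  | nil => simp [add_BIO_seq_altGo, pvBIOSpec]
  | cons x rest =>
    rw [add_BIO_seq_altGo]
    set same := rest.takeWhile (fun y => y == x) with hsame
    set rest' := rest.dropWhile (fun y => y == x) with hrest'
    have hsplit : rest = List.replicate same.length x ++ rest' := by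
      conv_lhs => rw [← List.takeWhile_append_dropWhile (p := fun y => y == x) (l := rest)]
      rw [← hsame, ← hrest']
      congr 1
      exact pvTakeWhileEqReplicate x rest
    have hlen : rest'.length < n := by
      subst hn
      simp only [List.length_cons, hrest']
      exact Nat.lt_succ_of_le (List.length_dropWhile_le _ _)
    have hcond : ∀ y t, rest' = y :: t → y = outside ∨ y ≠ x := by
      intro y t hy
      right
      have hh := List.head?_dropWhile_not (p := fun y => y == x) (l := rest)
      rw [← hrest', hy] at hh
      simpa using hh
    have hrec : add_BIO_seq_altGo begin inside outside rest' = pvBIOSpec begin inside outside x rest' :=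
      ih rest'.length hlen rest' x hcond rfl
    have hrest : pvBIOSpec begin inside outside x rest
        = List.replicate same.length (pvBIOStep begin inside outside x x) ++ pvBIOSpec begin inside outside x rest' := by
      conv_lhs => rw [hsplit]
      exact pvSpecReplicate ..
    rw [hrec, pvBIOSpec, hrest]
    by_cases hx : x = outside
    · subst hx
      simp [pvBIOStep, List.replicate_succ]
    · have hprev : x ≠ prev := (h x rest rfl).resolve_left hx
      simp [pvBIOStep, hx, hprev]

-- ===== VERDICT (by name: the statement is the Claim_ definition above) =====
theorem add_BIO_seq_spec : Claim_equal_add_BIO_seq := by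
  intro seq begin inside outside _
  unfold Spec_add_BIO_seq add_BIO_seq add_BIO_seq_alt
  simp only []
  rw [PySem.List.slice_zero_start, PySem.List.slice_to_neg_one]
  have hfn : (fun (new_seq : List String) (pc : String × String) =>
      if (pc.2 == outside) = true then new_seq ++ [pc.2]
      else if (pc.2 != pc.1) = true then new_seq ++ [begin ++ pc.2]
      else if (pc.2 == pc.1) = true then new_seq ++ [inside ++ pc.2] else new_seq)
      = (fun (acc : List String) (pc : String × String) => acc ++ [pvBIOStep begin inside outside pc.1 pc.2]) := by
    funext acc pc
    by_cases h1 : (pc.2 == outside) = true <;> by_cases h2 : (pc.2 == pc.1) = true <;>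
      simp [pvBIOStep, bne, h1, h2]
  rw [hfn]
  rw [show (List.foldl (fun acc pc => acc ++ [pvBIOStep begin inside outside pc.1 pc.2]) [] ((outside :: seq.dropLast).zip seq))
        = [] ++ ((outside :: seq.dropLast).zip seq).map (fun pc => pvBIOStep begin inside outside pc.1 pc.2)
      from pvFoldlAppend _ _ _]
  rw [pvZipMapSpec]
  rw [pvAltGoSpec begin inside outside seq outside
      (by intro x t _; by_cases h : x = outside
          · exact Or.inl h
          · exact Or.inr h)]
  simp
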